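-- pv_equiv track=rewrite | github.com/SKNETWORKS-FAMILY-AICAMP/SKN21-FINAL-5TEAM | chatbot/src/onboarding/patch_planner.py | _pick_entrypoint_candidate
-- ===== SOURCE A (Python) =====
-- def _pick_entrypoint_candidate(candidates_by_path: dict[str, dict[str, str]]) -> str | None:
--     entrypoints = [
--         path
--         for path in candidates_by_path
--         if path.lower().endswith(("main.py", "app.py"))
--     ]
--     if not entrypoints:
--         return None
--     return sorted(entrypoints, key=lambda path: (len(path), path))[0]
-- ===== SOURCE B (Python) =====
-- def _pick_entrypoint_candidate(candidates_by_path: dict[str, dict[str, str]]) -> str | None: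
--     best = None
--     for path in candidates_by_path:
--         if not path.lower().endswith(("main.py", "app.py")):
--             continue
--         if best is None or len(path) < len(best) or (len(path) == len(best) and path < best):
--             best = path
--     return best
-- ===== Notes on version B (the rewrite author's own statement) =====
-- stated objective: simpler
-- what changed: Replaces build-filtered-list-then-sort-and-take-first with a single explicit pass keeping a running best under the (len, path) key, so no intermediate list or sort.
import Mathlib
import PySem

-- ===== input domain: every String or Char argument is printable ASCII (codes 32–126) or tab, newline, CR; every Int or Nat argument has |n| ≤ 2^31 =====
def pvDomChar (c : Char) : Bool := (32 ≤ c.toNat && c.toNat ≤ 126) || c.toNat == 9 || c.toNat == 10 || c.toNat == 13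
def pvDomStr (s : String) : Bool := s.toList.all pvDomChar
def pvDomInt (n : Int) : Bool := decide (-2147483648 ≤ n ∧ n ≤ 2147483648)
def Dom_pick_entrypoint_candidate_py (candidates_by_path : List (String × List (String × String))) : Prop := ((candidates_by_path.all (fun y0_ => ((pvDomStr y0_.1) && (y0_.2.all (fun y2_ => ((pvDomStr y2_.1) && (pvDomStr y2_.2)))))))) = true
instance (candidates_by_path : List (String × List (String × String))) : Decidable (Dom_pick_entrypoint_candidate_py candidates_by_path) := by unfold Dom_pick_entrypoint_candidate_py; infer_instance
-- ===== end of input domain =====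

-- B is a single explicit pass keeping a running best under the (len, path) key, instead of
-- building a filtered list, sorting it, and taking its first element (objective: simpler).

-- shared helper: path.lower().endswith(("main.py", "app.py")) — the same test in both sources
def pvIsEntry (path : String) : Bool :=
  PySem.Str.endswith (PySem.Str.lower path) "main.py" || PySem.Str.endswith (PySem.Str.lower path) "app.py"

-- ===== PORT A =====
-- the Python tuple key (len(path), path) compared lexicographically is the Lex order on Int × String
def pick_entrypoint_candidate_py (candidates_by_path : List (String × List (String × String))) : Option String :=
  let entrypoints := (candidates_by_path.map (fun kv => kv.1)).filter pvIsEntry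
  if entrypoints.isEmpty then none
  else (PySem.List.sorted entrypoints (fun path => (toLex ((PySem.Str.len path, path) : Int × String)))).head?

-- ===== PORT B =====
-- the running-best update: best is None, or the new key (len, path) is strictly smaller
def pvStep (best : Option String) (p : String) : Option String :=
  match best with
  | none => some p
  | some b =>
    if (PySem.Str.len p < PySem.Str.len b) ||
       (PySem.Str.len p == PySem.Str.len b && decide (p < b)) then some p
    else some b

def pick_entrypoint_candidate_py_alt (candidates_by_path : List (String × List (String × String))) : Option String :=
  candidates_by_path.foldl
    (fun best kv => if !(pvIsEntry kv.1) then best else pvStep best kv.1)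
    none

-- ===== PRECONDITION & SPEC =====
def Spec_pick_entrypoint_candidate_py (candidates_by_path : List (String × List (String × String))) (out : Option String) : Prop := out = pick_entrypoint_candidate_py_alt candidates_by_path
instance (candidates_by_path : List (String × List (String × String))) (out : Option String) : Decidable (Spec_pick_entrypoint_candidate_py candidates_by_path out) := by unfold Spec_pick_entrypoint_candidate_py; infer_instance

-- ===== CLAIM (what is proved, stated in full; the proofs are below) =====
def Claim_equal_pick_entrypoint_candidate_py : Prop := ∀ (candidates_by_path : List (String × List (String × String))), Dom_pick_entrypoint_candidate_py candidates_by_path → Spec_pick_entrypoint_candidate_py candidates_by_path (pick_entrypoint_candidate_py candidates_by_path)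

-- ===== LEMMAS AND PROOFS =====

-- the key A sorts by; it is injective (the path itself is the second component)
def pvKey (path : String) : Lex (Int × String) := toLex ((PySem.Str.len path, path) : Int × String)

theorem pvKey_inj {p q : String} (h : pvKey p = pvKey q) : p = q := by
  unfold pvKey at h
  have := congrArg (fun x => (ofLex x).2) h
  simpa using this

theorem pvStep_eq (best : Option String) (p : String) :
    pvStep best p = match best with
      | none => some p
      | some b => if pvKey p < pvKey b then some p else some b := by
  cases best with
  | none => rfl
  | some b =>
    simp [pvStep, pvKey, Prod.Lex.lt_iff]

-- B's whole fold equals the plain min-fold over the filtered key list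
theorem pvAlt_eq_foldl (cs : List (String × List (String × String))) (acc : Option String) :
    cs.foldl (fun best kv => if !(pvIsEntry kv.1) then best else pvStep best kv.1) acc
    = ((cs.map (fun kv => kv.1)).filter pvIsEntry).foldl pvStep acc := by
  induction cs generalizing acc with
  | nil => rfl
  | cons kv t ih =>
    simp only [List.foldl_cons, List.map_cons, List.filter_cons]
    by_cases h : pvIsEntry kv.1
    · simpa [h] using ih (pvStep acc kv.1)
    · simpa [h] using ih acc

-- the min-fold returns a minimum (w.r.t. pvKey) of b together with the list
theorem pvFoldl_min (es : List String) (b : String) :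
    ∃ m, es.foldl pvStep (some b) = some m ∧ m ∈ b :: es ∧ ∀ y ∈ b :: es, pvKey m ≤ pvKey y := by
  induction es generalizing b with
  | nil => exact ⟨b, rfl, by simp, by simp⟩
  | cons p t ih =>
    simp only [List.foldl, pvStep_eq]
    by_cases h : pvKey p < pvKey b
    · obtain ⟨m, hm, hmem, hmin⟩ := ih p
      refine ⟨m, by simpa [h] using hm, ?_, ?_⟩
      · rcases List.mem_cons.mp hmem with rfl | h1
        · simp
        · simp [h1]
      · intro y hy
        rcases List.mem_cons.mp hy with rfl | hy
        · exact le_trans (hmin p (by simp)) (le_of_lt h)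
        · exact hmin y (by simpa using hy)
    · obtain ⟨m, hm, hmem, hmin⟩ := ih b
      refine ⟨m, by simpa [h] using hm, ?_, ?_⟩
      · rcases List.mem_cons.mp hmem with rfl | h1
        · simp
        · simp [h1]
      · intro y hy
        rcases List.mem_cons.mp hy with rfl | hy
        · exact hmin y (by simp)
        · rcases List.mem_cons.mp hy with rfl | hy
          · exact le_trans (hmin b (by simp)) (not_lt.mp h)
          · exact hmin y (by simp [hy])

-- ===== VERDICT (by name: the statement is the Claim_ definition above) =====
theorem pick_entrypoint_candidate_py_spec : Claim_equal_pick_entrypoint_candidate_py := by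
  intro cs _
  show pick_entrypoint_candidate_py cs = pick_entrypoint_candidate_py_alt cs
  unfold pick_entrypoint_candidate_py pick_entrypoint_candidate_py_alt
  rw [pvAlt_eq_foldl]
  set es := (cs.map (fun kv => kv.1)).filter pvIsEntry with hes
  cases hcase : es with
  | nil => simp
  | cons e t =>
    have hne : ¬ es.isEmpty := by simp [hcase]
    simp only [List.foldl, pvStep]
    -- A side: head of the stable sort is a minimum
    cases hs : PySem.List.sorted (e :: t) pvKey false with
    | nil => exact absurd ((PySem.List.sorted_eq_nil_iff (e :: t) pvKey false).mp hs) (by simp)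
    | cons a s =>
      have haMin : ∀ y ∈ e :: t, pvKey a ≤ pvKey y := PySem.List.key_head_sorted_le (e :: t) pvKey hs
      have haMem : a ∈ e :: t := by
        have : a ∈ PySem.List.sorted (e :: t) pvKey false := by simp [hs]
        exact (PySem.List.mem_sorted (e :: t) pvKey false a).mp this
      obtain ⟨m, hm, hmem, hmin⟩ := pvFoldl_min t e
      have h1 : pvKey a ≤ pvKey m := haMin m hmem
      have h2 : pvKey m ≤ pvKey a := hmin a haMem
      have : a = m := pvKey_inj (le_antisymm h1 h2)
      have hAside : (PySem.List.sorted (e :: t) pvKey false).head? = some a := by simp [hs]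
      calc (PySem.List.sorted (e :: t) (fun path => (toLex ((PySem.Str.len path, path) : Int × String))) ).head?
          = (PySem.List.sorted (e :: t) pvKey false).head? := rfl
        _ = some a := hAside
        _ = some m := by rw [this]
        _ = t.foldl pvStep (some e) := hm.symm
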